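-- pv_equiv track=rewrite | github.com/miliar/Code_Jam_Webscraper | solutions_python/Problem_201/308.py | solve
-- ===== SOURCE A (Python) =====
-- import bisect
--
-- def insert(s, a):
--     (v, c) = a
--     if v == 0: return
--     pos = bisect.bisect(s, (v, 0))
--     if pos == len(s) -1 or len(s) == 0:
--         s.insert(pos, (v, c))
--     else:
--         (v2, c2) = s[pos]
--         if v2 == v:
--             s[pos] = (v, c+c2)
--         else:
--             s.insert(pos, (v,c))
--
-- def solve(n,k) :
--     s = [(n,1)]
--     while True:
--         (p, i) = s.pop()
--         if k <= i:
--             break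
--         k -= i
--         p -= 1
--         l,r = (p//2 + p%2, p//2)
--         insert(s, (l, i))
--         insert(s, (r, i))
--
--     p -= 1
--     return (p//2 + p%2, p//2)
-- ===== SOURCE B (Python) =====
-- def solve(n, k):
--     # Track the current level of segment sizes as scalars: the level holds
--     # groups of size `big` (count bc) and size `big - 1` (count sc).
--     big, bc, sc = n, 1, 0
--     while True:
--         if k <= bc:
--             p = big - 1
--             return (p // 2 + p % 2, p // 2)
--         k -= bc
--         if k <= sc:
--             p = big - 2
--             return (p // 2 + p % 2, p // 2)
--         k -= sc
--         p = big - 1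
--         if p % 2 == 0:
--             big, bc, sc = p // 2, 2 * bc + sc, sc
--         else:
--             big, bc, sc = (p + 1) // 2, bc, bc + 2 * sc
--         if big - 1 == 0:
--             sc = 0
-- ===== Notes on version B (the rewrite author's own statement) =====
-- stated objective: simpler
-- what changed: A maintains a bisect-sorted list of (gap-size, count) groups with a quirky insert/merge helper; B keeps only four integers per level (the at most two distinct gap sizes with their counts) and walks the levels with pure arithmetic, no list at all.
-- outside the precondition, e.g. on solve(-5, 2): A returns (-2, -2), B returns (-2, -2); on solve(0, 2): A returns (-1, -1), B returns (0, -1); on solve(-5, 3): A raises IndexError, B returns (-2, -2)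
import Mathlib
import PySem

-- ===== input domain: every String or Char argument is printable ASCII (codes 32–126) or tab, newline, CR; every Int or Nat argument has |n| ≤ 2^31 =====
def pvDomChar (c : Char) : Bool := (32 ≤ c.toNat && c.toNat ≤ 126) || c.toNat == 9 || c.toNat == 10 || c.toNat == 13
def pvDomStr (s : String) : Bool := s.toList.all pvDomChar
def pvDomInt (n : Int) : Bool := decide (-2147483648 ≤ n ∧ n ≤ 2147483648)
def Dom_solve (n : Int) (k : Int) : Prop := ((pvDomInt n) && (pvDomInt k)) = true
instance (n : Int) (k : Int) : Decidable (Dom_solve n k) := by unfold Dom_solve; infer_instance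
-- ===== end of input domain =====

-- B replaces A's bisect-maintained multiset of segment sizes by four scalars
-- (the at most two distinct sizes of the current level with their counts); objective: simpler.

-- ===== PORT A =====

-- return value after `p -= 1; return (p//2 + p%2, p//2)` (Python // and % via PySem)
def gapsA (p : Int) : Int × Int :=
  (PySem.Int.floordiv p 2 + PySem.Int.mod p 2, PySem.Int.floordiv p 2)

-- Python tuple comparison (v2, c2) <= (v, c) — lexicographic
def pyTupLe (a b : Int × Int) : Bool :=
  decide (a.1 < b.1) || (a.1 == b.1 && decide (a.2 ≤ b.2))

-- bisect.bisect(s, key): insertion point after the elements ≤ key (s is kept sorted by A)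
def bisectA (s : List (Int × Int)) (key : Int × Int) : Nat :=
  s.countP (fun e => pyTupLe e key)

-- A's helper `insert` (with its exact branch structure, including the no-merge branch
-- taken when pos == len(s)-1)
def insertA (s : List (Int × Int)) (a : Int × Int) : List (Int × Int) :=
  if a.1 = 0 then s
  else
    let pos := bisectA s (a.1, 0)
    if pos = s.length - 1 ∨ s.length = 0 then s.insertIdx pos a
    else
      match s[pos]? with
      | some (v2, c2) => if v2 = a.1 then s.set pos (a.1, a.2 + c2) else s.insertIdx pos a
      | none => s.insertIdx pos a  -- Python raises IndexError here; not reached on inputs Pre_solve admits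

-- the `while True` loop; s.pop() pops the LAST element; fuel k.toNat+1 suffices because
-- every non-breaking iteration decreases k by the popped count (≥ 1 on reachable states)
def loopA : Nat → List (Int × Int) → Int → Int × Int
  | 0, _, _ => (0, 0)
  | fuel + 1, s, k =>
    match s.getLast? with
    | none => (0, 0)  -- Python: s.pop() on [] raises IndexError; not reached on inputs Pre_solve admits
    | some (p, i) =>
      if k ≤ i then gapsA (p - 1)
      else
        let p' := p - 1
        let l := PySem.Int.floordiv p' 2 + PySem.Int.mod p' 2
        let r := PySem.Int.floordiv p' 2
        loopA fuel (insertA (insertA s.dropLast (l, i)) (r, i)) (k - i)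

def solve (n : Int) (k : Int) : Int × Int := loopA (k.toNat + 1) [(n, 1)] k

-- ===== PORT B =====

-- B's `while True` loop over levels: the level holds `bc` groups of size `big`
-- and `sc` groups of size `big - 1`; fuel k.toNat+1 suffices (k drops by bc + sc ≥ 1 per level)
def loopB : Nat → Int → Int → Int → Int → Int × Int
  | 0, _, _, _, _ => (0, 0)
  | fuel + 1, big, bc, sc, k =>
    if k ≤ bc then
      (PySem.Int.floordiv (big - 1) 2 + PySem.Int.mod (big - 1) 2, PySem.Int.floordiv (big - 1) 2)
    else if k - bc ≤ sc then
      (PySem.Int.floordiv (big - 2) 2 + PySem.Int.mod (big - 2) 2, PySem.Int.floordiv (big - 2) 2)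
    else
      let k' := k - bc - sc
      let p := big - 1
      let st :=
        if PySem.Int.mod p 2 = 0 then (PySem.Int.floordiv p 2, 2 * bc + sc, sc)
        else (PySem.Int.floordiv (p + 1) 2, bc, bc + 2 * sc)
      loopB fuel st.1 st.2.1 (if st.1 - 1 = 0 then 0 else st.2.2) k'

def solve_alt (n : Int) (k : Int) : Int × Int := loopB (k.toNat + 1) n 1 0 k

-- ===== PRECONDITION & SPEC =====
-- Pre_solve restricts to the problem's natural domain plus the trivially answered k ≤ 1:
-- for n ≤ 0 with k ≥ 2 the function splits empty/negative "gaps" — A then raises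
-- IndexError for most such inputs and returns accidental values on the rest.
def Pre_solve (n : Int) (k : Int) : Prop := k ≤ 1 ∨ (1 ≤ n ∧ k ≤ n)
instance (n : Int) (k : Int) : Decidable (Pre_solve n k) := by unfold Pre_solve; infer_instance

def pvWitness_solve : Int × Int := (5, 3)

def Spec_solve (n : Int) (k : Int) (out : Int × Int) : Prop := out = solve_alt n k
instance (n : Int) (k : Int) (out : Int × Int) : Decidable (Spec_solve n k out) := by
  unfold Spec_solve; infer_instance

-- ===== CLAIM (what is proved, stated in full; the proofs are below) =====
def Claim_equal_solve : Prop :=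
  ∀ (n : Int) (k : Int), Dom_solve n k → Pre_solve n k → Spec_solve n k (solve n k)

-- ===== LEMMAS AND PROOFS =====

-- total count of a list of (size, count) groups
def csum (xs : List (Int × Int)) : Int := (xs.map (·.2)).sum
-- total count of the groups of size v
def wsum (v : Int) (xs : List (Int × Int)) : Int := csum (xs.filter (fun e => e.1 == v))
-- non-decreasing sizes (A keeps its list sorted)
def SortedSz (xs : List (Int × Int)) : Prop := List.Pairwise (fun a b : Int × Int => a.1 ≤ b.1) xs
-- every group has count ≥ 1
def PosC (xs : List (Int × Int)) : Prop := ∀ e ∈ xs, 1 ≤ e.2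

-- children sizes of a group of size v (Python // and %, divisor 2)
def lch (v : Int) : Int := PySem.Int.floordiv (v - 1) 2 + PySem.Int.mod (v - 1) 2
def rch (v : Int) : Int := PySem.Int.floordiv (v - 1) 2

theorem fd2 (x : Int) : PySem.Int.floordiv x 2 = x / 2 :=
  PySem.Int.floordiv_eq_ediv_of_pos (by norm_num)
theorem md2 (x : Int) : PySem.Int.mod x 2 = x % 2 :=
  PySem.Int.mod_eq_emod_of_pos (by norm_num)


theorem wsum_nil (v : Int) : wsum v [] = 0 := rfl
theorem csum_nil : csum [] = 0 := rfl
theorem csum_cons (e : Int × Int) (l : List (Int × Int)) : csum (e :: l) = e.2 + csum l := by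
  simp [csum]
theorem wsum_cons (v : Int) (e : Int × Int) (l : List (Int × Int)) :
    wsum v (e :: l) = (if e.1 = v then e.2 else 0) + wsum v l := by
  by_cases h : e.1 = v <;> simp [wsum, h, csum_cons]
theorem csum_append (l1 l2 : List (Int × Int)) : csum (l1 ++ l2) = csum l1 + csum l2 := by
  simp [csum]
theorem csum_nonneg {l : List (Int × Int)} (h : PosC l) : 0 ≤ csum l := by
  induction l with
  | nil => simp [csum_nil]
  | cons e t ih =>
    have he := h e (by simp)
    have : PosC t := fun x hx => h x (by simp [hx])
    have := ih this
    rw [csum_cons]; omega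
theorem length_le_csum {l : List (Int × Int)} (h : PosC l) : (l.length : Int) ≤ csum l := by
  induction l with
  | nil => simp [csum_nil]
  | cons e t ih =>
    have he := h e (by simp)
    have ht : PosC t := fun x hx => h x (by simp [hx])
    have := ih ht
    rw [csum_cons]; simp only [List.length_cons]; push_cast; omega
theorem csum_eq_wsum {l : List (Int × Int)} (v : Int) (h : ∀ e ∈ l, e.1 = v) :
    csum l = wsum v l := by
  induction l with
  | nil => simp [csum_nil, wsum_nil]
  | cons e t ih =>
    have he := h e (by simp)
    rw [csum_cons, wsum_cons, ih (fun x hx => h x (by simp [hx])), if_pos he]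

theorem lch_lt {v : Int} (hv : 1 ≤ v) : lch v < v := by
  unfold lch; rw [fd2, md2]; omega
theorem rch_le_lch (v : Int) : rch v ≤ lch v := by
  unfold lch rch; rw [fd2, md2]; omega

theorem insertA_zero (s : List (Int × Int)) (c : Int) : insertA s (0, c) = s := by
  simp [insertA]

theorem insertA_cons_lt (a : Int × Int) (s : List (Int × Int)) (v c : Int) (h : a.1 < v) :
    insertA (a :: s) (v, c) = a :: insertA s (v, c) := by
  by_cases hv : v = 0
  · simp [insertA, hv]
  · have hle : pyTupLe a (v, 0) = true := by simp [pyTupLe, h]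
    simp only [insertA, bisectA, hv, List.countP_cons, hle, if_true]
    cases s with
    | nil => simp
    | cons b t =>
      have hm : (b :: t).countP (fun e => pyTupLe e (v, 0)) ≤ (b :: t).length :=
        List.countP_le_length
      set m := (b :: t).countP (fun e => pyTupLe e (v, 0)) with hmdef
      have hlen : (a :: b :: t).length = (b :: t).length + 1 := by simp
      by_cases hc : m = (b :: t).length - 1 ∨ (b :: t).length = 0
      · have hc' : m + 1 = (a :: b :: t).length - 1 ∨ (a :: b :: t).length = 0 := by
          rcases hc with hc | hc
          · left; simp at hc ⊢; omega
          · simp at hc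
        rw [if_pos hc', if_pos hc]; simp [List.insertIdx_succ_cons]
      · have hc' : ¬ (m + 1 = (a :: b :: t).length - 1 ∨ (a :: b :: t).length = 0) := by
          simp only [List.length_cons] at hc ⊢
          push_neg at hc ⊢
          constructor
          · omega
          · omega
        rw [if_neg hc', if_neg hc]
        have hget : (a :: b :: t)[m + 1]? = (b :: t)[m]? := by
          simp
        rw [hget]
        cases hx : (b :: t)[m]? with
        | none => simp [List.insertIdx_succ_cons]
        | some e =>
          cases e with
          | mk v2 c2 =>
            by_cases hv2 : v2 = v
            · simp [hv2, List.set_cons_succ]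
            · simp [hv2, List.insertIdx_succ_cons]

-- insertion at position 0 without merge
theorem insertA_pos0 (s : List (Int × Int)) (v c : Int) (hv : v ≠ 0)
    (h0 : s.countP (fun e => pyTupLe e (v, 0)) = 0)
    (hne : ∀ e, s[0]? = some e → e.1 ≠ v) :
    insertA s (v, c) = (v, c) :: s := by
  cases s with
  | nil => simp [insertA, bisectA, hv]
  | cons b t =>
    have hb := hne b (by simp)
    simp only [insertA, bisectA, hv, h0]
    by_cases hone : t = []
    · subst hone; simp
    · have hlen : (b :: t).length ≠ 1 := by
        simp only [List.length_cons]; intro hx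
        exact hone (List.eq_nil_of_length_eq_zero (by omega))
      have hcond : ¬ (0 = (b :: t).length - 1 ∨ (b :: t).length = 0) := by
        simp only [List.length_cons] at hlen ⊢; omega
      rw [if_neg hcond]
      simp [hb]

-- insertion at position 0 with merge into the head
theorem insertA_pos0_merge (a : Int × Int) (s : List (Int × Int)) (v c : Int) (hv : v ≠ 0)
    (hav : a.1 = v) (hs : s ≠ [])
    (h0 : (a :: s).countP (fun e => pyTupLe e (v, 0)) = 0) :
    insertA (a :: s) (v, c) = (v, c + a.2) :: s := by
  have hlen : (a :: s).length ≠ 1 := by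
    simp only [List.length_cons]; intro hx
    exact hs (List.eq_nil_of_length_eq_zero (by omega))
  have hcond : ¬ (0 = (a :: s).length - 1 ∨ (a :: s).length = 0) := by
    simp only [List.length_cons] at hlen ⊢; omega
  simp only [insertA, bisectA, hv, h0, hcond]
  simp [hav]

-- the quirky non-merging branch: a singleton of the same size
theorem insertA_pos0_single (a : Int × Int) (v c : Int) (hv : v ≠ 0) (_hav : a.1 = v)
    (h0 : [a].countP (fun e => pyTupLe e (v, 0)) = 0) :
    insertA [a] (v, c) = [(v, c), a] := by
  simp only [insertA, bisectA, hv, h0]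
  simp

theorem insertA_spec : ∀ (u rest : List (Int × Int)) (v c : Int), v ≠ 0 → 1 ≤ c →
    SortedSz (u ++ rest) → PosC (u ++ rest) → (∀ e ∈ rest, v < e.1) →
    ∃ u', insertA (u ++ rest) (v, c) = u' ++ rest
       ∧ SortedSz (u' ++ rest) ∧ PosC u'
       ∧ (∀ x, wsum x u' = wsum x u + if x = v then c else 0)
       ∧ (∀ e ∈ u', e.1 ∈ u.map (·.1) ∨ e.1 = v) := by
  intro u
  induction u with
  | nil =>
    intro rest v c hv hc hs hp hr
    have h0 : rest.countP (fun e => pyTupLe e (v, 0)) = 0 := by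
      rw [List.countP_eq_zero]
      intro e he
      have := hr e he
      simp only [pyTupLe, Bool.or_eq_true, decide_eq_true_eq, Bool.and_eq_true, beq_iff_eq]
      push_neg
      exact ⟨by omega, fun h => absurd h (by omega)⟩
    have heq : insertA ([] ++ rest) (v, c) = (v, c) :: rest := by
      rw [List.nil_append]
      refine insertA_pos0 rest v c hv h0 ?_
      intro e he
      have hmem : e ∈ rest := List.mem_of_getElem? he
      have := hr e hmem; omega
    refine ⟨[(v, c)], by rw [heq]; rfl, ?_, ?_, ?_, ?_⟩
    · constructor
      · intro e he
        exact le_of_lt (hr e (by simpa using he))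
      · simpa using hs
    · intro e he; simp at he; subst he; simpa using hc
    · intro x
      simp only [wsum_cons, wsum_nil]
      by_cases hx : x = v
      · subst hx; simp
      · simp [hx, Ne.symm hx]
    · intro e he; simp at he; subst he; simp
  | cons a u ih =>
    intro rest v c hv hc hs hp hr
    have ha2 : 1 ≤ a.2 := hp a (by simp)
    have hsRest : SortedSz (u ++ rest) := hs.of_cons
    have hpRest : PosC (u ++ rest) := fun e he => hp e (by simp [he])
    have haLe : ∀ e ∈ u ++ rest, a.1 ≤ e.1 := by
      intro e he; exact (List.pairwise_cons.mp hs).1 e he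
    rcases lt_trichotomy a.1 v with hlt | heq | hgt
    · rw [List.cons_append, insertA_cons_lt _ _ _ _ hlt]
      obtain ⟨u', heq', hsort, hpos', hw, hsz⟩ := ih rest v c hv hc hsRest hpRest hr
      refine ⟨a :: u', by rw [heq']; rfl, ?_, ?_, ?_, ?_⟩
      · rw [List.cons_append]
        constructor
        · intro e he
          simp only [List.mem_append] at he
          rcases he with he | he
          · rcases hsz e he with h | h
            · simp only [List.mem_map] at h
              obtain ⟨y, hy, hxy⟩ := h
              rw [← hxy]
              exact haLe y (by simp [hy])
            · rw [h]; exact le_of_lt hlt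
          · exact haLe e (by simp [he])
        · exact hsort
      · intro e he
        rcases List.mem_cons.mp he with he | he
        · subst he; exact ha2
        · exact hpos' e he
      · intro x
        rw [wsum_cons, wsum_cons, hw x]; ring
      · intro e he
        rcases List.mem_cons.mp he with he | he
        · subst he; left; simp
        · rcases hsz e he with h | h
          · left; simp only [List.map_cons, List.mem_cons]; right; exact h
          · right; exact h
    · have h0 : ((a :: u) ++ rest).countP (fun e => pyTupLe e (v, 0)) = 0 := by
        rw [List.countP_eq_zero]
        intro e he
        have hge : v ≤ e.1 ∧ (e.1 = v → 1 ≤ e.2) := by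
          have hd : e = a ∨ e ∈ u ∨ e ∈ rest := by simpa using he
          rcases hd with he' | he' | he'
          · subst he'; exact ⟨le_of_eq heq.symm, fun _ => ha2⟩
          · exact ⟨le_trans (le_of_eq heq.symm) (haLe e (by simp [he'])), fun _ => hp e (by simp [he'])⟩
          · exact ⟨le_trans (le_of_eq heq.symm) (haLe e (by simp [he'])), fun _ => hp e (by simp [he'])⟩
        simp only [pyTupLe, Bool.or_eq_true, decide_eq_true_eq, Bool.and_eq_true, beq_iff_eq]
        push_neg
        exact ⟨by omega, fun h => by have := hge.2 h; omega⟩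
    -- merge with the head, or the quirky split when the head is alone
      by_cases hone : u = [] ∧ rest = []
      · obtain ⟨hu, hrest⟩ := hone; subst hu; subst hrest
        have heq2 : insertA ([a] ++ ([] : List (Int × Int))) (v, c) = [(v, c), a] := by
          rw [List.append_nil]
          exact insertA_pos0_single a v c hv heq (by simpa using h0)
        refine ⟨[(v, c), a], by rw [heq2]; rfl, ?_, ?_, ?_, ?_⟩
        · simp only [List.append_nil]
          constructor
          · intro e he; simp at he; subst he; simp [heq]
          · simp
        · intro e he
          simp only [List.mem_cons, List.not_mem_nil, or_false] at he
          rcases he with he | he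
          · subst he; exact hc
          · subst he; exact ha2
        · intro x
          simp only [wsum_cons, wsum_nil]
          by_cases hx : x = v
          · subst hx; simp [heq]; ring
          · simp [heq, hx, Ne.symm hx]
        · intro e he
          simp only [List.mem_cons, List.not_mem_nil, or_false] at he
          rcases he with he | he
          · subst he; right; rfl
          · subst he; left; simp
      · have hne : u ++ rest ≠ [] := by
          intro hx
          rcases List.append_eq_nil_iff.mp hx with ⟨h1, h2⟩
          exact hone ⟨h1, h2⟩
        have heq2 : insertA ((a :: u) ++ rest) (v, c) = (v, c + a.2) :: (u ++ rest) := by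
          rw [List.cons_append]
          exact insertA_pos0_merge a (u ++ rest) v c hv heq hne (by simpa using h0)
        refine ⟨(v, c + a.2) :: u, by rw [heq2]; rfl, ?_, ?_, ?_, ?_⟩
        · rw [List.cons_append]
          constructor
          · intro e he
            have h1 := haLe e he
            show v ≤ e.1
            omega
          · exact hsRest
        · intro e he
          rcases List.mem_cons.mp he with he | he
          · subst he; show 1 ≤ c + a.2; omega
          · exact hpRest e (by simp [he])
        · intro x
          simp only [wsum_cons]
          by_cases hx : x = v
          · subst hx; simp [heq]; ring
          · simp [heq, hx, Ne.symm hx]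
        · intro e he
          rcases List.mem_cons.mp he with he | he
          · subst he; right; rfl
          · left; simp only [List.map_cons, List.mem_cons]; right
            exact List.mem_map_of_mem he
    · have h0 : ((a :: u) ++ rest).countP (fun e => pyTupLe e (v, 0)) = 0 := by
        rw [List.countP_eq_zero]
        intro e he
        have hgt' : v < e.1 := by
          have hd : e = a ∨ e ∈ u ∨ e ∈ rest := by simpa using he
          rcases hd with he' | he' | he'
          · subst he'; exact hgt
          · exact lt_of_lt_of_le hgt (haLe e (by simp [he']))
          · exact hr e he'        
        simp only [pyTupLe, Bool.or_eq_true, decide_eq_true_eq, Bool.and_eq_true, beq_iff_eq]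
        push_neg
        exact ⟨by omega, fun h => absurd h (by omega)⟩
      have heq2 : insertA ((a :: u) ++ rest) (v, c) = (v, c) :: ((a :: u) ++ rest) := by
        refine insertA_pos0 ((a :: u) ++ rest) v c hv h0 ?_
        intro e he
        simp only [List.cons_append, List.getElem?_cons_zero, Option.some_inj] at he
        subst he; omega
      refine ⟨(v, c) :: a :: u, by rw [heq2]; rfl, ?_, ?_, ?_, ?_⟩
      · rw [List.cons_append]
        constructor
        · intro e he
          have hd : e = a ∨ e ∈ u ∨ e ∈ rest := by simpa using he
          rcases hd with he' | he' | he'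
          · rw [he']; exact le_of_lt hgt
          · exact le_of_lt (lt_of_lt_of_le hgt (haLe e (by simp [he'])))
          · exact le_of_lt (hr e he')
        · exact hs
      · intro e he
        rcases List.mem_cons.mp he with he | he
        · subst he; exact hc
        · refine hp e ?_
          have hd : e = a ∨ e ∈ u := by simpa using he
          rcases hd with h | h
          · simp [h]
          · simp [h]
      · intro x
        simp only [wsum_cons]
        by_cases hx : x = v
        · subst hx; ring
        · simp [hx, Ne.symm hx]
      · intro e he
        rcases List.mem_cons.mp he with he | he
        · subst he; right; rfl
        · left; exact List.mem_map_of_mem he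

theorem insertA_spec0 (u rest : List (Int × Int)) (v c : Int) (hc : 1 ≤ c)
    (hs : SortedSz (u ++ rest)) (hp : PosC (u ++ rest)) (hr : ∀ e ∈ rest, v < e.1) :
    ∃ u', insertA (u ++ rest) (v, c) = u' ++ rest
       ∧ SortedSz (u' ++ rest) ∧ PosC u'
       ∧ (∀ x, wsum x u' = wsum x u + if x = v ∧ v ≠ 0 then c else 0)
       ∧ (∀ e ∈ u', e.1 ∈ u.map (·.1) ∨ (e.1 = v ∧ v ≠ 0)) := by
  by_cases hv : v = 0
  · refine ⟨u, by simp [hv, insertA_zero], hs, fun e he => hp e (by simp [he]), ?_, ?_⟩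
    · intro x; simp [hv]
    · intro e he; exact Or.inl (List.mem_map_of_mem he)
  · obtain ⟨u', h1, h2, h3, h4, h5⟩ := insertA_spec u rest v c hv hc hs hp hr
    refine ⟨u', h1, h2, h3, ?_, ?_⟩
    · intro x; rw [h4 x]; by_cases hx : x = v <;> simp [hx, hv]
    · intro e he; rcases h5 e he with h | h
      · exact Or.inl h
      · exact Or.inr ⟨h, hv⟩

theorem lch_lt_pred {v : Int} (hv : 3 ≤ v) : lch v < v - 1 := by
  unfold lch; rw [fd2, md2]; omega

theorem sorted_restrict {s t : List (Int × Int)} (h : SortedSz (s ++ t)) : SortedSz s :=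
  h.sublist (List.sublist_append_left s t)

-- one maximal-size run is popped entirely; the answer is its gap pair
theorem phase_break : ∀ (w pre : List (Int × Int)) (v k : Int) (fa : Nat),
    (∀ e ∈ w, e.1 = v ∧ 1 ≤ e.2) → SortedSz (pre ++ w) → PosC (pre ++ w) → 1 ≤ v →
    1 ≤ k → k ≤ csum w → k.toNat ≤ fa →
    loopA fa (pre ++ w) k = gapsA (v - 1) := by
  intro w
  induction w using List.reverseRecOn with
  | nil =>
    intro pre v k fa _ _ _ _ hk1 hk2 _
    exfalso; rw [csum_nil] at hk2; omega
  | append_singleton w0 e ih =>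
    intro pre v k fa hw hs hp hv hk1 hk2 hfa
    obtain ⟨p, i⟩ := e
    obtain ⟨hpv, hi⟩ := hw (p, i) (by simp)
    simp only at hpv
    obtain ⟨fa0, rfl⟩ : ∃ fa0, fa = fa0 + 1 := ⟨fa - 1, by omega⟩
    have hw0 : ∀ e ∈ w0, e.1 = v ∧ 1 ≤ e.2 := fun e he => hw e (by simp [he])
    have hcs0 : 0 ≤ csum w0 := csum_nonneg (fun e he => (hw0 e he).2)
    have hshape : pre ++ (w0 ++ [(p, i)]) = (pre ++ w0) ++ [(p, i)] := by simp
    rw [hshape]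
    simp only [loopA, List.getLast?_concat]
    rw [hpv]
    have hi' : 1 ≤ i := hi
    by_cases hki : k ≤ i
    · simp [hki]
    · rw [if_neg hki, List.dropLast_concat]
      have hcw : csum (w0 ++ [(p, i)]) = csum w0 + i := by
        rw [csum_append, csum_cons, csum_nil]; ring
      have hsp : SortedSz (pre ++ w0) := by
        rw [hshape] at hs
        exact sorted_restrict hs
      have hpp : PosC (pre ++ w0) := by
        intro e he
        refine hp e ?_
        rw [hshape]
        rcases List.mem_append.mp he with h | h <;> simp [h]
      have hlv : lch v < v := lch_lt hv
      have hrv : rch v < v := lt_of_le_of_lt (rch_le_lch v) hlv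
      have hr1 : ∀ e ∈ w0, lch v < e.1 := fun e he => by rw [(hw0 e he).1]; exact hlv
      have hr2 : ∀ e ∈ w0, rch v < e.1 := fun e he => by rw [(hw0 e he).1]; exact hrv
      rw [show (PySem.Int.floordiv (v - 1) 2 + PySem.Int.mod (v - 1) 2) = lch v from rfl,
          show PySem.Int.floordiv (v - 1) 2 = rch v from rfl]
      obtain ⟨u1, he1, hs1, hp1, _, _⟩ :=
        insertA_spec0 pre w0 (lch v) i (by omega) hsp hpp hr1
      have hp1' : PosC (u1 ++ w0) := by
        intro e he
        rcases List.mem_append.mp he with h | h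
        · exact hp1 e h
        · exact hpp e (by simp [h])
      rw [he1]
      obtain ⟨u2, he2, hs2, hp2, _, _⟩ :=
        insertA_spec0 u1 w0 (rch v) i (by omega) hs1 hp1' hr2
      rw [he2]
      refine ih u2 v (k - i) fa0 hw0 hs2 ?_ hv (by omega) (by omega) (by omega)
      intro e he
      rcases List.mem_append.mp he with h | h
      · exact hp2 e h
      · exact hpp e (by simp [h])

-- a maximal-size run is popped without the answer being found: the loop continues
-- on the children accumulated below the untouched suffix t
theorem phase_go : ∀ (w u t : List (Int × Int)) (v k : Int) (fa : Nat),
    (∀ e ∈ w, e.1 = v ∧ 1 ≤ e.2) → SortedSz (u ++ (t ++ w)) → PosC (u ++ (t ++ w)) →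
    (∀ e ∈ t, lch v < e.1) → 1 ≤ v →
    csum w < k → w.length ≤ fa →
    ∃ u', loopA fa (u ++ (t ++ w)) k = loopA (fa - w.length) (u' ++ t) (k - csum w)
       ∧ SortedSz (u' ++ t) ∧ PosC u'
       ∧ (∀ x, wsum x u' = wsum x u + (if x = lch v ∧ lch v ≠ 0 then csum w else 0)
                          + (if x = rch v ∧ rch v ≠ 0 then csum w else 0))
       ∧ (∀ e ∈ u', e.1 ∈ u.map (·.1) ∨ (e.1 = lch v ∧ lch v ≠ 0)
                    ∨ (e.1 = rch v ∧ rch v ≠ 0)) := by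
  intro w
  induction w using List.reverseRecOn with
  | nil =>
    intro u t v k fa hw hs hp ht hv hk hfa
    refine ⟨u, ?_, by simpa using hs, fun e he => hp e (by simp [he]), ?_, ?_⟩
    · simp [csum_nil]
    · intro x; simp [csum_nil]
    · intro e he; left; exact List.mem_map_of_mem he
  | append_singleton w0 e ih =>
    intro u t v k fa hw hs hp ht hv hk hfa
    obtain ⟨p, i⟩ := e
    obtain ⟨hpv, hi⟩ := hw (p, i) (by simp)
    simp only at hpv
    obtain ⟨fa0, rfl⟩ : ∃ fa0, fa = fa0 + 1 :=
      ⟨fa - 1, by simp only [List.length_append, List.length_cons] at hfa; omega⟩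
    have hw0 : ∀ e ∈ w0, e.1 = v ∧ 1 ≤ e.2 := fun e he => hw e (by simp [he])
    have hcs0 : 0 ≤ csum w0 := csum_nonneg (fun e he => (hw0 e he).2)
    have hcw : csum (w0 ++ [(p, i)]) = csum w0 + i := by
      rw [csum_append, csum_cons, csum_nil]; ring
    have hshape : u ++ (t ++ (w0 ++ [(p, i)])) = (u ++ (t ++ w0)) ++ [(p, i)] := by simp
    rw [hshape]
    simp only [loopA, List.getLast?_concat]
    rw [hpv]
    have hi' : 1 ≤ i := hi
    rw [hpv] at hcw hk
    have hki : ¬ k ≤ i := by omega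
    rw [if_neg hki, List.dropLast_concat]
    have hsp : SortedSz (u ++ (t ++ w0)) := by
      rw [hshape] at hs
      exact sorted_restrict hs
    have hpp : PosC (u ++ (t ++ w0)) := by
      intro e he
      refine hp e ?_
      rw [hshape]
      rcases List.mem_append.mp he with h | h
      · simp [h]
      · rcases List.mem_append.mp h with h2 | h2 <;> simp [h2]
    have hlv : lch v < v := lch_lt hv
    have hrv : rch v < v := lt_of_le_of_lt (rch_le_lch v) hlv
    have hr1 : ∀ e' ∈ t ++ w0, lch v < e'.1 := by
      intro e' he'
      rcases List.mem_append.mp he' with h | h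
      · exact ht e' h
      · rw [(hw0 e' h).1]; exact hlv
    have hr2 : ∀ e' ∈ t ++ w0, rch v < e'.1 := by
      intro e' he'
      exact lt_of_le_of_lt (rch_le_lch v) (hr1 e' he')
    rw [show (PySem.Int.floordiv (v - 1) 2 + PySem.Int.mod (v - 1) 2) = lch v from rfl,
        show PySem.Int.floordiv (v - 1) 2 = rch v from rfl]
    obtain ⟨u1, he1, hs1, hp1, hw1, hz1⟩ :=
      insertA_spec0 u (t ++ w0) (lch v) i (by omega) (by simpa using hsp) (by simpa using hpp) hr1
    have hp1' : PosC (u1 ++ (t ++ w0)) := by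
      intro e he
      rcases List.mem_append.mp he with h | h
      · exact hp1 e h
      · exact hpp e (by simp at h ⊢; tauto)
    rw [show u ++ (t ++ w0) = u ++ (t ++ w0) from rfl, (by simpa using he1 :
        insertA (u ++ (t ++ w0)) (lch v, i) = u1 ++ (t ++ w0))]
    obtain ⟨u2, he2, hs2, hp2, hw2, hz2⟩ :=
      insertA_spec0 u1 (t ++ w0) (rch v) i (by omega) hs1 hp1' hr2
    rw [(by simpa using he2 : insertA (u1 ++ (t ++ w0)) (rch v, i) = u2 ++ (t ++ w0))]
    have hp2' : PosC (u2 ++ (t ++ w0)) := by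
      intro e he
      rcases List.mem_append.mp he with h | h
      · exact hp2 e h
      · exact hpp e (by simp at h ⊢; tauto)
    obtain ⟨u', hA, hsort', hpos', hwsum', hsz'⟩ :=
      ih u2 t v (k - i) fa0 hw0 (by simpa using hs2) hp2' ht hv (by omega) (by
        simp only [List.length_append, List.length_cons] at hfa ⊢; omega)
    refine ⟨u', ?_, hsort', hpos', ?_, ?_⟩
    · rw [hA, hcw]
      have hfl : fa0 - w0.length = fa0 + 1 - (w0 ++ [(v, i)]).length := by
        simp only [List.length_append, List.length_cons, List.length_nil]; omega
      rw [hfl]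
      congr 1
      ring
    · intro x
      rw [hwsum' x, hw2 x, hw1 x, hcw]
      split_ifs <;> omega
    · intro e he
      rcases hsz' e he with h | h | h
      · simp only [List.mem_map] at h
        obtain ⟨y, hy, hxy⟩ := h
        rcases hz2 y hy with h' | h'
        · simp only [List.mem_map] at h'
          obtain ⟨y', hy', hxy'⟩ := h'
          rcases hz1 y' hy' with h'' | h''
          · left; rw [← hxy, ← hxy']
            simp only [List.mem_map] at h'' ⊢
            exact h''
          · right; left; rw [← hxy, ← hxy']; exact h''
        · right; right; rw [← hxy]; exact h'
      · right; left; exact h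
      · right; right; exact h

theorem pairwise_const {l : List (Int × Int)} {c : Int} (h : ∀ e ∈ l, e.1 = c) : SortedSz l := by
  induction l with
  | nil => exact List.Pairwise.nil
  | cons a t ih =>
    constructor
    · intro e he; rw [h a (by simp), h e (by simp [he])]
    · exact ih (fun e he => h e (by simp [he]))

theorem sorted_two_run {sp bp : List (Int × Int)} {a b : Int} (hab : a ≤ b)
    (hsp : ∀ e ∈ sp, e.1 = a) (hbp : ∀ e ∈ bp, e.1 = b) : SortedSz (sp ++ bp) := by
  rw [SortedSz, List.pairwise_append]
  refine ⟨pairwise_const hsp, pairwise_const hbp, ?_⟩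
  intro x hx y hy
  rw [hsp x hx, hbp y hy]
  exact hab

-- a sorted list whose sizes take two values splits into the two runs
theorem two_run_decomp : ∀ (xs : List (Int × Int)) (a b : Int), a < b → SortedSz xs →
    (∀ e ∈ xs, e.1 = a ∨ e.1 = b) →
    xs = xs.filter (fun e => e.1 == a) ++ xs.filter (fun e => e.1 == b) := by
  intro xs
  induction xs with
  | nil => intro a b _ _ _; rfl
  | cons e t ih =>
    intro a b hab hs hsz
    have hst : SortedSz t := hs.of_cons
    rcases hsz e (by simp) with he | he
    · have h1 : (e.1 == a) = true := by simp [he]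
      have h2 : ¬ ((e.1 == b) = true) := by simp [he]; omega
      rw [List.filter_cons, List.filter_cons]
      simp only [h1, if_true, h2]
      rw [List.cons_append]
      congr 1
      exact ih a b hab hst (fun x hx => hsz x (by simp [hx]))
    · have hall : ∀ x ∈ t, x.1 = b := by
        intro x hx
        have hge : e.1 ≤ x.1 := (List.pairwise_cons.mp hs).1 x hx
        rcases hsz x (by simp [hx]) with h | h
        · omega
        · exact h
      have hfa : t.filter (fun x => x.1 == a) = [] := by
        rw [List.filter_eq_nil_iff]
        intro x hx
        simp [hall x hx]
        omega
      have hfb : (e :: t).filter (fun x => x.1 == b) = e :: t := by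
        rw [List.filter_eq_self]
        intro x hx
        rcases List.mem_cons.mp hx with h | h
        · subst h; simp [he]
        · simp [hall x h]
      have h1 : ¬ ((e.1 == a) = true) := by simp [he]; omega
      rw [List.filter_cons]
      simp only [h1]
      rw [hfa, hfb]
      rfl

-- one unfolding of B's loop
theorem loopB_succ (fb : Nat) (b bc sc k : Int) :
    loopB (fb + 1) b bc sc k =
      if k ≤ bc then gapsA (b - 1)
      else if k - bc ≤ sc then gapsA (b - 2)
      else if PySem.Int.mod (b - 1) 2 = 0 then
        loopB fb (PySem.Int.floordiv (b - 1) 2) (2 * bc + sc)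
          (if PySem.Int.floordiv (b - 1) 2 - 1 = 0 then 0 else sc) (k - bc - sc)
      else
        loopB fb (PySem.Int.floordiv (b - 1 + 1) 2) bc
          (if PySem.Int.floordiv (b - 1 + 1) 2 - 1 = 0 then 0 else bc + 2 * sc) (k - bc - sc) := by
  rw [loopB]
  by_cases h1 : k ≤ bc
  · simp [h1, gapsA]
  · by_cases h2 : k - bc ≤ sc
    · simp [h1, h2, gapsA]
    · by_cases h3 : PySem.Int.mod (b - 1) 2 = 0
      · simp only [if_neg h1, if_neg h2, if_pos h3]
      · simp only [if_neg h1, if_neg h2, if_neg h3]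

-- the main bisimulation: A's sorted multiset loop against B's scalar level loop
theorem levels : ∀ (K : Nat) (b bc sc k : Int) (fa fb : Nat) (sp bp : List (Int × Int)),
    k.toNat ≤ K → 1 ≤ k → 1 ≤ b → 1 ≤ bc → 0 ≤ sc →
    (∀ e ∈ sp, e.1 = b - 1 ∧ 1 ≤ e.2) → (∀ e ∈ bp, e.1 = b ∧ 1 ≤ e.2) →
    csum sp = sc → csum bp = bc → (0 < sc → 2 ≤ b) →
    k ≤ b * bc + (b - 1) * sc → k.toNat ≤ fa → k.toNat ≤ fb →
    loopA fa (sp ++ bp) k = loopB fb b bc sc k := by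
  intro K
  induction K using Nat.strong_induction_on with
  | _ K ih =>
    intro b bc sc k fa fb sp bp hK hk1 hb hbc hsc hsp hbp hcsp hcbp hscb hnr hfa hfb
    obtain ⟨fb0, rfl⟩ : ∃ m, fb = m + 1 := ⟨fb - 1, by omega⟩
    have hsorted : SortedSz (sp ++ bp) :=
      sorted_two_run (by omega) (fun e he => (hsp e he).1) (fun e he => (hbp e he).1)
    have hposc : PosC (sp ++ bp) := by
      intro e he
      rcases List.mem_append.mp he with h | h
      · exact (hsp e h).2
      · exact (hbp e h).2
    have hlbp : (bp.length : Int) ≤ bc := by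
      rw [← hcbp]; exact length_le_csum (fun e he => (hbp e he).2)
    have hlsp : (sp.length : Int) ≤ sc := by
      rw [← hcsp]; exact length_le_csum (fun e he => (hsp e he).2)
    rw [loopB_succ]
    by_cases hkbc : k ≤ bc
    · rw [if_pos hkbc,
        phase_break bp sp b k fa hbp hsorted hposc hb hk1 (by omega) hfa]
    · rw [if_neg hkbc]
      have hk2pos : 1 ≤ k - bc := by omega
      rcases (by omega : b = 1 ∨ b = 2 ∨ 3 ≤ b) with hb1 | hb2 | hb3
      · exfalso
        have hsc0 : sc = 0 := by
          rcases lt_or_ge 0 sc with h | h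
          · have := hscb h; omega
          · omega
        rw [hb1, hsc0] at hnr
        norm_num at hnr
        omega
      · -- b = 2: the children of the big groups merge into the size-1 groups;
        -- every break below this level yields (0, 0)
        subst hb2
        obtain ⟨u1, hA, hs1, hp1, hw1, hz1⟩ :=
          phase_go bp sp [] 2 k fa hbp (by simpa using hsorted) (by simpa using hposc)
            (by intro e he; simp at he) (by norm_num) (by omega) (by omega)
        simp only [List.nil_append, List.append_nil] at hA
        rw [hcbp] at hA
        have hsz1' : ∀ e ∈ u1, e.1 = 1 := by
          intro e he
          rcases hz1 e he with h | h | h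
          · simp only [List.mem_map] at h
            obtain ⟨y, hy, hxy⟩ := h
            rw [← hxy, (hsp y hy).1]
            norm_num
          · rw [show lch 2 = 1 by decide] at h
            exact h.1
          · rw [show rch 2 = 0 by decide] at h
            exact absurd rfl h.2
        have hwsp : wsum 1 sp = sc := by
          rw [← csum_eq_wsum 1 (fun e he => by have := (hsp e he).1; omega)]
          exact hcsp
        have hcu1 : csum u1 = sc + bc := by
          rw [csum_eq_wsum 1 hsz1', hw1 1]
          rw [show lch 2 = 1 by decide, show rch 2 = 0 by decide, hwsp, hcbp]
          norm_num
        have hbrk : loopA (fa - bp.length) u1 (k - bc) = gapsA 0 := by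
          have hple : k - bc ≤ csum u1 ∨ ¬ (k - bc ≤ csum u1) := em _
          have hknr : k - bc ≤ sc + bc := by
            have h2 : k ≤ 2 * bc + (2 - 1) * sc := hnr
            omega
          exact phase_break u1 [] 1 (k - bc) (fa - bp.length)
            (fun e he => ⟨hsz1' e he, hp1 e he⟩) (by simpa using hs1)
            (by intro e he; exact hp1 e (by simpa using he)) (by norm_num) hk2pos
            (by omega) (by omega)
        by_cases hks : k - bc ≤ sc
        · rw [if_pos hks, hA, hbrk]
          decide
        · rw [if_neg hks]
          rw [if_neg (by decide : ¬ (PySem.Int.mod (2 - 1) 2 = 0))]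
          rw [show PySem.Int.floordiv (2 - 1 + 1) 2 = 1 by decide]
          rw [if_pos (by norm_num : (1 : Int) - 1 = 0)]
          obtain ⟨fb1, rfl⟩ : ∃ m, fb0 = m + 1 := ⟨fb0 - 1, by omega⟩
          rw [loopB_succ]
          have hk3 : k - bc - sc ≤ bc := by
            have h2 : k ≤ 2 * bc + (2 - 1) * sc := hnr
            omega
          rw [if_pos hk3, hA, hbrk]
          decide
      · -- 3 ≤ b: a full level is processed and the loop recurses on the next level
        obtain ⟨u1, hA1, hs1, hp1, hw1, hz1⟩ :=
          phase_go bp [] sp b k fa hbp (by simpa using hsorted) (by simpa using hposc)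
            (fun e he => by rw [(hsp e he).1]; exact lch_lt_pred hb3) (by omega)
            (by omega) (by omega)
        simp only [List.nil_append] at hA1
        rw [hcbp] at hA1
        have hp1' : PosC (u1 ++ sp) := by
          intro e he
          rcases List.mem_append.mp he with h | h
          · exact hp1 e h
          · exact (hsp e h).2
        by_cases hks : k - bc ≤ sc
        · rw [if_pos hks, hA1,
            phase_break sp u1 (b - 1) (k - bc) (fa - bp.length) hsp hs1 hp1'
              (by omega) hk2pos (by omega) (by omega)]
          rw [show b - 1 - 1 = b - 2 by ring]
        · rw [if_neg hks]
          obtain ⟨u2, hA2, hs2, hp2, hw2, hz2⟩ :=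
            phase_go sp u1 [] (b - 1) (k - bc) (fa - bp.length) hsp
              (by simpa using hs1) (by simpa using hp1') (by intro e he; simp at he)
              (by omega) (by omega) (by
                have := hlsp
                omega)
          simp only [List.nil_append, List.append_nil] at hA2
          rw [hcsp] at hA2
          have hwu2 : ∀ x, wsum x u2 = (if x = lch b ∧ lch b ≠ 0 then bc else 0)
              + (if x = rch b ∧ rch b ≠ 0 then bc else 0)
              + (if x = lch (b - 1) ∧ lch (b - 1) ≠ 0 then sc else 0)
              + (if x = rch (b - 1) ∧ rch (b - 1) ≠ 0 then sc else 0) := by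
            intro x
            rw [hw2 x, hw1 x, hcbp, hcsp]
            simp only [wsum_nil]
            ring
          have hk3pos : 1 ≤ k - bc - sc := by omega
          have hparm : PySem.Int.mod (b - 1) 2 = 0 ∨ ¬ (PySem.Int.mod (b - 1) 2 = 0) := em _
          rcases hparm with hpe | hpo
          · -- even p = b - 1: children sizes (b-1)/2 and (b-1)/2 - 1
            rw [if_pos hpe]
            rw [md2] at hpe
            have h1 : lch b = (b - 1) / 2 := by unfold lch; rw [fd2, md2]; omega
            have h2 : rch b = (b - 1) / 2 := by unfold rch; rw [fd2]
            have h3 : lch (b - 1) = (b - 1) / 2 := by unfold lch; rw [fd2, md2]; omega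
            have h4 : rch (b - 1) = (b - 1) / 2 - 1 := by unfold rch; rw [fd2]; omega
            have hH1 : 1 ≤ (b - 1) / 2 := by omega
            have hsz2 : ∀ e ∈ u2, e.1 = (b - 1) / 2 - 1 ∨ e.1 = (b - 1) / 2 := by
              intro e he
              rcases hz2 e he with h | h | h
              · simp only [List.mem_map] at h
                obtain ⟨y, hy, hxy⟩ := h
                rcases hz1 y hy with h' | h' | h'
                · simp at h'
                · right; rw [← hxy, h'.1, h1]
                · right; rw [← hxy, h'.1, h2]
              · right; rw [h.1, h3]
              · left; rw [h.1, h4]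
            have hwbig : wsum ((b - 1) / 2) u2 = 2 * bc + sc := by
              rw [hwu2, h1, h2, h3, h4]
              split_ifs <;> omega
            have hwsmall : wsum ((b - 1) / 2 - 1) u2
                = (if (b - 1) / 2 - 1 = 0 then 0 else sc) := by
              rw [hwu2, h1, h2, h3, h4]
              split_ifs <;> omega
            have hdec := two_run_decomp u2 ((b - 1) / 2 - 1) ((b - 1) / 2) (by omega)
              (by simpa using hs2) hsz2
            have hrec := ih (k - bc - sc).toNat (by omega) ((b - 1) / 2) (2 * bc + sc)
              (if (b - 1) / 2 - 1 = 0 then 0 else sc) (k - bc - sc)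
              (fa - bp.length - sp.length) fb0
              (u2.filter (fun e => e.1 == (b - 1) / 2 - 1))
              (u2.filter (fun e => e.1 == (b - 1) / 2))
              le_rfl hk3pos hH1 (by omega) (by split_ifs <;> omega)
              (by
                intro e he
                have hm := List.mem_filter.mp he
                exact ⟨by simpa using hm.2, hp2 e hm.1⟩)
              (by
                intro e he
                have hm := List.mem_filter.mp he
                exact ⟨by simpa using hm.2, hp2 e hm.1⟩)
              hwsmall hwbig
              (by intro h; split_ifs at h with hz <;> omega)
              (by
                obtain ⟨H, hHb⟩ : ∃ H, b = 2 * H + 1 ∧ H = (b - 1) / 2 := ⟨(b - 1) / 2, by omega, rfl⟩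
                rw [← hHb.2]
                rw [hHb.1] at hnr
                by_cases hz : H - 1 = 0
                · rw [if_pos hz]
                  have hH1' : H = 1 := by omega
                  rw [hH1'] at hnr ⊢
                  norm_num at hnr ⊢
                  omega
                · rw [if_neg hz]
                  ring_nf at hnr ⊢
                  linarith)
              (by
                have h5 : (bp.length : Int) ≤ bc := hlbp
                have h6 : (sp.length : Int) ≤ sc := hlsp
                omega)
              (by omega)
            rw [hA1, hA2, hdec, fd2]
            exact hrec
          · -- odd p = b - 1: children sizes (b-1)/2 + 1 and (b-1)/2
            rw [if_neg hpo]
            rw [md2] at hpo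
            have h1 : lch b = (b - 1) / 2 + 1 := by unfold lch; rw [fd2, md2]; omega
            have h2 : rch b = (b - 1) / 2 := by unfold rch; rw [fd2]
            have h3 : lch (b - 1) = (b - 1) / 2 := by unfold lch; rw [fd2, md2]; omega
            have h4 : rch (b - 1) = (b - 1) / 2 := by unfold rch; rw [fd2]; omega
            have hH1 : 1 ≤ (b - 1) / 2 := by omega
            have hsz2 : ∀ e ∈ u2, e.1 = (b - 1) / 2 ∨ e.1 = (b - 1) / 2 + 1 := by
              intro e he
              rcases hz2 e he with h | h | h
              · simp only [List.mem_map] at h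
                obtain ⟨y, hy, hxy⟩ := h
                rcases hz1 y hy with h' | h' | h'
                · simp at h'
                · right; rw [← hxy, h'.1, h1]
                · left; rw [← hxy, h'.1, h2]
              · left; rw [h.1, h3]
              · left; rw [h.1, h4]
            have hwbig : wsum ((b - 1) / 2 + 1) u2 = bc := by
              rw [hwu2, h1, h2, h3, h4]
              split_ifs <;> omega
            have hwsmall : wsum ((b - 1) / 2) u2 = bc + 2 * sc := by
              rw [hwu2, h1, h2, h3, h4]
              split_ifs <;> omega
            have hdec := two_run_decomp u2 ((b - 1) / 2) ((b - 1) / 2 + 1) (by omega)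
              (by simpa using hs2) hsz2
            have hrec := ih (k - bc - sc).toNat (by omega) ((b - 1) / 2 + 1) bc
              (bc + 2 * sc) (k - bc - sc) (fa - bp.length - sp.length) fb0
              (u2.filter (fun e => e.1 == (b - 1) / 2))
              (u2.filter (fun e => e.1 == (b - 1) / 2 + 1))
              le_rfl hk3pos (by omega) (by omega) (by omega)
              (by
                intro e he
                have hm := List.mem_filter.mp he
                refine ⟨?_, hp2 e hm.1⟩
                have : e.1 = (b - 1) / 2 := by simpa using hm.2
                omega)
              (by
                intro e he
                have hm := List.mem_filter.mp he
                exact ⟨by simpa using hm.2, hp2 e hm.1⟩)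
              hwsmall
              hwbig
              (by intro _; omega)
              (by
                obtain ⟨H, hHb⟩ : ∃ H, b = 2 * H + 2 ∧ H = (b - 1) / 2 := ⟨(b - 1) / 2, by omega, rfl⟩
                rw [← hHb.2]
                rw [hHb.1] at hnr
                ring_nf at hnr ⊢
                linarith)
              (by
                have h5 : (bp.length : Int) ≤ bc := hlbp
                have h6 : (sp.length : Int) ≤ sc := hlsp
                omega)
              (by omega)
            rw [hA1, hA2, hdec]
            rw [show b - 1 + 1 = b by ring, fd2]
            rw [show b / 2 = (b - 1) / 2 + 1 by omega]
            rw [if_neg (by omega : ¬ ((b - 1) / 2 + 1 - 1 = 0))]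
            exact hrec


-- ===== VERDICT (by name: the statement is the Claim_ definition above) =====
theorem solve_spec : Claim_equal_solve := by
  intro n k _ hpre
  unfold Spec_solve solve solve_alt
  by_cases hkle : k ≤ 1
  · obtain ⟨m, hm⟩ : ∃ m, k.toNat + 1 = m + 1 := ⟨k.toNat, rfl⟩
    rw [hm, loopB_succ, if_pos (by omega : k ≤ (1 : Int))]
    simp only [loopA, List.getLast?_singleton]
    rw [if_pos (by omega : k ≤ (1 : Int))]
  · have hnk : 1 ≤ n ∧ k ≤ n := by
      rcases hpre with h | h
      · omega
      · exact h
    have := levels k.toNat n 1 0 k (k.toNat + 1) (k.toNat + 1) [] [(n, 1)]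
      le_rfl (by omega) hnk.1 (by norm_num) le_rfl
      (by intro e he; simp at he)
      (by intro e he; simp at he; rw [he]; exact ⟨rfl, by norm_num⟩)
      rfl (by simp [csum]) (by omega)
      (by have := hnk.2; ring_nf; omega)
      (by omega) (by omega)
    simpa using this
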